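-- pv_equiv track=rewrite | github.com/tsaiyu0816/MUSIC-HW | HW3/task2_generate.py | build_ngram_ban
-- ===== SOURCE A (Python) =====
-- def build_ngram_ban(seq, n):
--     """HuggingFace 類似的 no-repeat-ngram：回傳給定序列目前 prefix 的被禁止 next ids 集合。"""
--     if n <= 1 or len(seq) < n-1:
--         return set()
--     mapping = {}
--     for i in range(len(seq) - n + 1):
--         prefix = tuple(seq[i:i+n-1])
--         nxt = seq[i+n-1]
--         mapping.setdefault(prefix, set()).add(int(nxt))
--     prefix = tuple(seq[-(n-1):])
--     return mapping.get(prefix, set())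
-- ===== SOURCE B (Python) =====
-- def build_ngram_ban(seq, n):
--     """Scan once for occurrences of the last (n-1)-gram and collect their successors,
--     instead of grouping every n-gram in a dict."""
--     if n <= 1 or len(seq) < n - 1:
--         return set()
--     k = n - 1
--     target = seq[len(seq) - k:]
--     banned = set()
--     for i in range(len(seq) - n + 1):
--         if seq[i:i + k] == target:
--             banned.add(int(seq[i + n - 1]))
--     return banned
-- ===== Notes on version B (the rewrite author's own statement) =====
-- stated objective: alternative
-- what changed: B drops A's dict of all (n-1)-gram groups (tuple keys, per-position set allocation) and instead compares each window directly against the fixed last prefix, collecting successors of matches in one pass.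
import Mathlib
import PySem

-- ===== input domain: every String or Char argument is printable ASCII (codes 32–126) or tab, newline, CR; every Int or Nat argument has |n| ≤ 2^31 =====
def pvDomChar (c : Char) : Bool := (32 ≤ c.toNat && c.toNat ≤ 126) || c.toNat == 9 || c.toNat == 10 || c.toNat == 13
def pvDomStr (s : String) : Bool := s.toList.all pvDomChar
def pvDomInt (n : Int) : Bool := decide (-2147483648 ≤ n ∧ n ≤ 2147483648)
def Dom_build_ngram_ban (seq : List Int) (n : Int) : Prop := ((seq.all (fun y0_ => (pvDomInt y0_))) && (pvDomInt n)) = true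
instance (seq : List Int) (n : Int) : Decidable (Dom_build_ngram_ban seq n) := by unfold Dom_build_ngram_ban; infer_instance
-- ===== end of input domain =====

-- B replaces A's dict of all (n-1)-gram groups by a direct one-pass comparison of each
-- window against the fixed last prefix (objective: alternative, same asymptotic cost).

-- ===== PORT A =====
-- seq[i+n-1] is always in range in the loop (0 ≤ i ≤ len-n), so pyGetD is exact here.
def build_ngram_ban (seq : List Int) (n : Int) : List Int :=
  if n ≤ 1 ∨ (seq.length : Int) < n - 1 then []
  else
    let mapping :=
      (PySem.List.pyRange 0 ((seq.length : Int) - n + 1) 1).foldl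
        (fun m i =>
          let pfx := PySem.List.slice seq (some i) (some (i + n - 1))
          let nxt := PySem.List.pyGetD seq (i + n - 1) 0
          PySem.Dict.modify m pfx PySem.Set.empty (fun s => PySem.Set.add s nxt))
        PySem.Dict.empty
    let pfx := PySem.List.slice seq (some (-(n - 1))) none
    PySem.Dict.getD mapping pfx PySem.Set.empty

-- ===== PORT B =====
def build_ngram_ban_alt (seq : List Int) (n : Int) : List Int :=
  if n ≤ 1 ∨ (seq.length : Int) < n - 1 then []
  else
    let k := n - 1
    let target := PySem.List.slice seq (some ((seq.length : Int) - k)) none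
    (PySem.List.pyRange 0 ((seq.length : Int) - n + 1) 1).foldl
      (fun banned i =>
        if PySem.List.slice seq (some i) (some (i + k)) = target
        then PySem.Set.add banned (PySem.List.pyGetD seq (i + n - 1) 0)
        else banned)
      PySem.Set.empty

-- ===== PRECONDITION & SPEC =====
def Spec_build_ngram_ban (seq : List Int) (n : Int) (out : List Int) : Prop := out = build_ngram_ban_alt seq n
instance (seq : List Int) (n : Int) (out : List Int) : Decidable (Spec_build_ngram_ban seq n out) := by unfold Spec_build_ngram_ban; infer_instance

-- ===== CLAIM (what is proved, stated in full; the proofs are below) =====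
def Claim_equal_build_ngram_ban : Prop := ∀ (seq : List Int) (n : Int), Dom_build_ngram_ban seq n → Spec_build_ngram_ban seq n (build_ngram_ban seq n)

-- ===== LEMMAS AND PROOFS =====

-- The value at `target` of the grouping fold equals the filtered collecting fold.
theorem getD_group_fold (l : List Int) (pfx : Int → List Int) (val : Int → Int)
    (target : List Int) (m : PySem.Dict (List Int) (PySem.Set Int)) :
    PySem.Dict.getD
      (l.foldl (fun m i =>
        PySem.Dict.modify m (pfx i) PySem.Set.empty (fun s => PySem.Set.add s (val i))) m)
      target PySem.Set.empty
    = l.foldl (fun b i => if pfx i = target then PySem.Set.add b (val i) else b)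
        (PySem.Dict.getD m target PySem.Set.empty) := by
  induction l generalizing m with
  | nil => simp [List.foldl]
  | cons i l ih =>
    simp only [List.foldl_cons]
    rw [ih]
    congr 1
    rw [PySem.Dict.getD_modify]
    by_cases h : pfx i = target
    · simp [h]
    · rw [if_neg (fun hh => h hh.symm), if_neg h]

theorem build_ngram_ban_eq (seq : List Int) (n : Int) :
    build_ngram_ban seq n = build_ngram_ban_alt seq n := by
  unfold build_ngram_ban build_ngram_ban_alt
  by_cases hg : n ≤ 1 ∨ (seq.length : Int) < n - 1
  · simp [hg]
  · simp only [hg, if_false]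
    push Not at hg
    obtain ⟨h1, h2⟩ := hg
    rw [getD_group_fold]
    rw [PySem.Dict.getD_empty]
    have hsl : PySem.List.slice seq (some (-(n - 1))) none
        = PySem.List.slice seq (some ((seq.length : Int) - (n - 1))) none := by
      rw [PySem.List.slice_some_none, PySem.List.slice_some_none]
      congr 1
      simp only [PySem.List.clampIdx]
      split_ifs <;> omega
    rw [hsl]
    apply PySem.List.foldl_congr_mem
    intro b i _
    have : i + n - 1 = i + (n - 1) := by ring
    rw [this]

-- ===== VERDICT (by name: the statement is the Claim_ definition above) =====
theorem build_ngram_ban_spec : Claim_equal_build_ngram_ban := by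
  intro seq n _
  unfold Spec_build_ngram_ban
  exact build_ngram_ban_eq seq n
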